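-- pv_equiv track=rewrite | github.com/Himank-Jeshwar/Python-Course | Personal Projects/ASCII_Code_Finder.py | ascii_of_symbol
-- ===== SOURCE A (Python) =====
-- def ascii_of_symbol(symbol):
--     symbolList1 = [" ","!","\"","#","$","%","&","\'","(",")","*","+",",","-",".","/"]
--     symbolList2 = [":",";","<","=",">","?","@"]
--     symbolList3 = ["[","\\","]","^","_","`"]
--     symbolList4 = ["{","|","}","~"]
--     ascii_values1 = [a1 for a1 in range(32,48)]
--     ascii_values2 = [a2 for a2 in range(58,65)]
--     ascii_values3 = [a3 for a3 in range(91,97)]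
--     ascii_values4 = [a4 for a4 in range(123,127)]
--     if symbol in symbolList1:
--         asc = ascii_values1[symbolList1.index(symbol)]
--         return asc
--     elif symbol in symbolList2:
--         asc = ascii_values2[symbolList2.index(symbol)]
--         return asc
--     elif symbol in symbolList3:
--         asc = ascii_values3[symbolList3.index(symbol)]
--         return asc
--     elif symbol in symbolList4:
--         asc = ascii_values4[symbolList4.index(symbol)]
--         return asc
--     else:
--         return "INVALID ARGUMENT : not a symbol."
-- ===== SOURCE B (Python) =====
-- def ascii_of_symbol(symbol):
--     if isinstance(symbol, str) and len(symbol) == 1: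
--         c = ord(symbol)
--         for lo, hi in ((32, 48), (58, 65), (91, 97), (123, 127)):
--             if lo <= c < hi:
--                 return c
--     return "INVALID ARGUMENT : not a symbol."
-- ===== Notes on version B (the rewrite author's own statement) =====
-- stated objective: simpler
-- what changed: B computes ord(symbol) once and tests it against the four half-open code bands, eliminating A's four parallel symbol/value lookup tables and the membership + .index scans.
import Mathlib
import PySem

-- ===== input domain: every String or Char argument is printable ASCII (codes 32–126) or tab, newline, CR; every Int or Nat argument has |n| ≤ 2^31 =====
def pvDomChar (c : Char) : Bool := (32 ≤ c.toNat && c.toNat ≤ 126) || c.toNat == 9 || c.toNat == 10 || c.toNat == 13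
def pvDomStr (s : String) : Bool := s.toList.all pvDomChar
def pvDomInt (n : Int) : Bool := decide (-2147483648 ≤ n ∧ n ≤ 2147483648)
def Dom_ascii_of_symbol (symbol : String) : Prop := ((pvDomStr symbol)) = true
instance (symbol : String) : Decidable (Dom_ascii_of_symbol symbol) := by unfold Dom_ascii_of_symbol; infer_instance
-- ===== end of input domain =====

-- B computes ord(symbol) and checks four code bands directly, replacing A's parallel lookup tables and .index scans (objective: simpler).
-- On non-symbol inputs A returns a STRING sentinel, not an Int; those inputs lie outside Pre_ (B returns the same string in Python).

-- ===== PORT A =====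
def ascii_of_symbol (symbol : String) : Int :=
  let symbolList1 : List String := [" ", "!", "\"", "#", "$", "%", "&", "'", "(", ")", "*", "+", ",", "-", ".", "/"]
  let symbolList2 : List String := [":", ";", "<", "=", ">", "?", "@"]
  let symbolList3 : List String := ["[", "\\", "]", "^", "_", "`"]
  let symbolList4 : List String := ["{", "|", "}", "~"]
  let ascii_values1 := PySem.List.pyRange 32 48 1
  let ascii_values2 := PySem.List.pyRange 58 65 1
  let ascii_values3 := PySem.List.pyRange 91 97 1
  let ascii_values4 := PySem.List.pyRange 123 127 1
  if symbol ∈ symbolList1 then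
    (((PySem.List.index? symbolList1 symbol).bind
        fun i => PySem.List.pyGet? ascii_values1 (i : Int))).getD 0
  else if symbol ∈ symbolList2 then
    (((PySem.List.index? symbolList2 symbol).bind
        fun i => PySem.List.pyGet? ascii_values2 (i : Int))).getD 0
  else if symbol ∈ symbolList3 then
    (((PySem.List.index? symbolList3 symbol).bind
        fun i => PySem.List.pyGet? ascii_values3 (i : Int))).getD 0
  else if symbol ∈ symbolList4 then
    (((PySem.List.index? symbolList4 symbol).bind
        fun i => PySem.List.pyGet? ascii_values4 (i : Int))).getD 0
  else
    0  -- Python returns the string "INVALID ARGUMENT : not a symbol." here; excluded by Pre_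

-- ===== PORT B =====
def ascii_of_symbol_alt (symbol : String) : Int :=
  match symbol.toList with
  | [c] =>
    let n : Int := c.toNat
    match ([(32, 48), (58, 65), (91, 97), (123, 127)] : List (Int × Int)).find?
        (fun p => decide (p.1 ≤ n ∧ n < p.2)) with
    | some _ => n
    | none => 0  -- Python returns the string "INVALID ARGUMENT : not a symbol." here; excluded by Pre_
  | _ => 0  -- same string sentinel in Python; excluded by Pre_

-- ===== PRECONDITION & SPEC =====
-- Pre_ excludes exactly the inputs on which A returns the string "INVALID ARGUMENT : not a symbol."
-- instead of an int (a value outside the declared Int return type): strings that are not a single symbol character.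
def Pre_ascii_of_symbol (symbol : String) : Prop :=
  symbol.toList.length = 1 ∧ (symbol.toList.all fun c =>
    (32 ≤ c.toNat && c.toNat < 48) || (58 ≤ c.toNat && c.toNat < 65) ||
    (91 ≤ c.toNat && c.toNat < 97) || (123 ≤ c.toNat && c.toNat < 127)) = true
instance (symbol : String) : Decidable (Pre_ascii_of_symbol symbol) := by
  unfold Pre_ascii_of_symbol; infer_instance

def pvWitness_ascii_of_symbol : String := "!"

def Spec_ascii_of_symbol (symbol : String) (out : Int) : Prop := out = ascii_of_symbol_alt symbol
instance (symbol : String) (out : Int) : Decidable (Spec_ascii_of_symbol symbol out) := by unfold Spec_ascii_of_symbol; infer_instance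

-- ===== CLAIM (what is proved, stated in full; the proofs are below) =====
def Claim_equal_ascii_of_symbol : Prop := ∀ (symbol : String), Dom_ascii_of_symbol symbol → Pre_ascii_of_symbol symbol → Spec_ascii_of_symbol symbol (ascii_of_symbol symbol)

-- ===== LEMMAS AND PROOFS =====

-- both ports agree on every single-character string whose code lies in one of the four bands
theorem single_char_agree (n : Nat)
    (h : (32 ≤ n ∧ n < 48) ∨ (58 ≤ n ∧ n < 65) ∨ (91 ≤ n ∧ n < 97) ∨ (123 ≤ n ∧ n < 127)) :
    ascii_of_symbol (String.ofList [Char.ofNat n]) =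
      ascii_of_symbol_alt (String.ofList [Char.ofNat n]) := by
  rcases h with ⟨h1, h2⟩ | ⟨h1, h2⟩ | ⟨h1, h2⟩ | ⟨h1, h2⟩ <;> interval_cases n <;> decide

-- ===== VERDICT (by name: the statement is the Claim_ definition above) =====
theorem ascii_of_symbol_spec : Claim_equal_ascii_of_symbol := by
  intro symbol _ hpre
  obtain ⟨hlen, hall⟩ := hpre
  obtain ⟨c, hc⟩ : ∃ c, symbol.toList = [c] := by
    rcases h : symbol.toList with _ | ⟨c, _ | _⟩ <;> simp [h] at hlen ⊢
  have hband : (32 ≤ c.toNat ∧ c.toNat < 48) ∨ (58 ≤ c.toNat ∧ c.toNat < 65) ∨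
      (91 ≤ c.toNat ∧ c.toNat < 97) ∨ (123 ≤ c.toNat ∧ c.toNat < 127) := by
    have := List.all_eq_true.mp hall c (by rw [hc]; exact List.mem_singleton.mpr rfl)
    simp only [Bool.or_eq_true, Bool.and_eq_true, decide_eq_true_eq] at this
    omega
  have hsym : symbol = String.ofList [c] := by
    rw [← hc, String.ofList_toList]
  have hofNat : Char.ofNat c.toNat = c := Char.ofNat_toNat c
  unfold Spec_ascii_of_symbol
  rw [hsym, ← hofNat]
  exact single_char_agree c.toNat hband
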